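-- pv_equiv track=rewrite | github.com/daphshez/codejam-women-io-2017 | A.py | solve
-- ===== SOURCE A (Python) =====
-- from collections import Counter
--
-- def solve(t):
--     f, s, tickets = t
--     ticket_set = set()
--     c = Counter()
--     for ticket in tickets:
--         if ticket[0] == ticket[1]:
--             c[ticket[0]] += 1
--         elif ticket in ticket_set:
--             pass
--         else:
--             c[ticket[0]] += 1
--             c[ticket[1]] += 1
--         ticket_set.add(ticket)
--     return min(f, max(c.values()), s)
-- ===== SOURCE B (Python) =====
-- def solve(t):
--     f, s, tickets = t
--     # same-endpoint tickets keep full multiplicity; distinct-endpoint tickets are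
--     # deduplicated (first occurrences) before contributing both endpoints
--     same = [a for (a, b) in tickets if a == b]
--     distinct = dict.fromkeys(tk for tk in tickets if tk[0] != tk[1])
--     stations = sorted(same + [x for tk in distinct for x in tk])
--     # longest run of equal stations in the sorted list = highest station frequency
--     best = run = 0
--     prev = None
--     for x in stations:
--         run = run + 1 if x == prev else 1
--         if run > best:
--             best = run
--         prev = x
--     return min(min(f, best), s)
-- ===== Notes on version B (the rewrite author's own statement) =====
-- stated objective: alternative
-- what changed: Replaces A's single interleaved loop with a hash Counter by: split tickets into same-endpoint (kept with multiplicity) and ordered-deduped distinct-endpoint ones, build the flat station list, sort it, and take the longest run of equal stations as the maximum frequency.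
import Mathlib
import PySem

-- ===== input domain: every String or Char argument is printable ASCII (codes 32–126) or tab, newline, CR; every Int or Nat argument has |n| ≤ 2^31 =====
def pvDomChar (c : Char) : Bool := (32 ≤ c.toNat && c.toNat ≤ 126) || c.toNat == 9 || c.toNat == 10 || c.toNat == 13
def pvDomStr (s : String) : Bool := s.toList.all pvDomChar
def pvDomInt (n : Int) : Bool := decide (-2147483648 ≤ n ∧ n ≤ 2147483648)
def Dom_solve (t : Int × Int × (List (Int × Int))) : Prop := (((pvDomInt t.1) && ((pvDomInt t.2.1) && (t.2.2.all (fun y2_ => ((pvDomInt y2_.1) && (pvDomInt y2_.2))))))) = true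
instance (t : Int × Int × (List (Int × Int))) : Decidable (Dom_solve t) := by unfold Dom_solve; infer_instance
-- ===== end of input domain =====

-- B replaces A's single interleaved Counter loop by: split tickets into same-endpoint
-- (kept with multiplicity) and deduplicated distinct-endpoint ones, build the flat
-- station list, sort it, and take the longest run of equal stations (objective: alternative).

-- ===== PORT A =====
-- the body of A's for-loop: update the Counter, then ticket_set.add(ticket)
def stepA (st : PySem.Set (Int × Int) × PySem.Dict Int Int) (ticket : Int × Int) :
    PySem.Set (Int × Int) × PySem.Dict Int Int :=
  let c' :=
    if ticket.1 = ticket.2 then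
      st.2.modify ticket.1 0 (· + 1)                     -- c[ticket[0]] += 1
    else if PySem.Set.contains st.1 ticket then
      st.2                                               -- pass
    else
      (st.2.modify ticket.1 0 (· + 1)).modify ticket.2 0 (· + 1)
  (PySem.Set.add st.1 ticket, c')                        -- ticket_set.add(ticket)

def solve (t : Int × Int × (List (Int × Int))) : Int :=
  let f := t.1
  let s := t.2.1
  let tickets := t.2.2
  let st := tickets.foldl stepA (PySem.Set.empty, PySem.Dict.empty)
  match PySem.List.max? (PySem.Dict.values st.2) (fun v => v) with
  | some m => min (min f m) s
  | none => 0      -- unreachable under Pre_solve: Python's max([]) raises ValueError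

-- ===== PORT B =====
-- the run-length scan: run/best/prev exactly as in Source B's for-loop
def runScan : List Int → Int → Int → Option Int → Int
  | [], best, _run, _prev => best
  | x :: xs, best, run, prev =>
    let run' := if some x = prev then run + 1 else 1
    let best' := if run' > best then run' else best
    runScan xs best' run' (some x)

def solve_alt (t : Int × Int × (List (Int × Int))) : Int :=
  let f := t.1
  let s := t.2.1
  let tickets := t.2.2
  let same := (tickets.filter (fun tk => decide (tk.1 = tk.2))).map (fun tk => tk.1)
  let distinct := PySem.List.dedup (tickets.filter (fun tk => decide (tk.1 ≠ tk.2)))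
  let stations := PySem.List.sorted (same ++ distinct.flatMap (fun tk => [tk.1, tk.2])) (fun x => x) false
  min (min f (runScan stations 0 0 none)) s

-- ===== PRECONDITION & SPEC =====
-- Pre_solve excludes exactly the inputs where A raises: empty ticket lists (max() of no values, ValueError)
def Pre_solve (t : Int × Int × (List (Int × Int))) : Prop := t.2.2 ≠ []
instance (t : Int × Int × (List (Int × Int))) : Decidable (Pre_solve t) := by unfold Pre_solve; infer_instance
def pvWitness_solve : (Int × Int × (List (Int × Int))) := (3, 2, [(1, 2)])

def Spec_solve (t : Int × Int × (List (Int × Int))) (out : Int) : Prop := out = solve_alt t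
instance (t : Int × Int × (List (Int × Int))) (out : Int) : Decidable (Spec_solve t out) := by unfold Spec_solve; infer_instance

-- ===== CLAIM (what is proved, stated in full; the proofs are below) =====
def Claim_equal_solve : Prop := ∀ (t : Int × Int × (List (Int × Int))), Dom_solve t → Pre_solve t → Spec_solve t (solve t)

-- ===== LEMMAS AND PROOFS =====

-- the station occurrences A's loop feeds into its Counter, in loop order
def contribA (seen : PySem.Set (Int × Int)) (tk : Int × Int) : List Int :=
  if tk.1 = tk.2 then [tk.1]
  else if PySem.Set.contains seen tk then []
  else [tk.1, tk.2]

def stationsA (seen : PySem.Set (Int × Int)) : List (Int × Int) → List Int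
  | [] => []
  | tk :: ts => contribA seen tk ++ stationsA (PySem.Set.add seen tk) ts

-- A's fold builds exactly Counter(stationsA)
theorem stepA_eq (seen : PySem.Set (Int × Int)) (d : PySem.Dict Int Int) (tk : Int × Int) :
    stepA (seen, d) tk
      = (PySem.Set.add seen tk, (contribA seen tk).foldl (fun d x => d.modify x 0 (· + 1)) d) := by
  unfold stepA contribA
  split_ifs with h1 h2 <;> rfl

theorem foldA_snd (ts : List (Int × Int)) : ∀ (seen : PySem.Set (Int × Int)) (d : PySem.Dict Int Int),
    (ts.foldl stepA (seen, d)).2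
    = (stationsA seen ts).foldl (fun d x => d.modify x 0 (· + 1)) d := by
  induction ts with
  | nil => intro seen d; rfl
  | cons tk ts ih =>
    intro seen d
    rw [List.foldl_cons, stepA_eq, stationsA, List.foldl_append]
    exact ih _ _

-- ordered dedup relative to an already-seen list
def ded (seen : List (Int × Int)) : List (Int × Int) → List (Int × Int)
  | [] => []
  | tk :: ts => if tk ∈ seen then ded seen ts else tk :: ded (seen ++ [tk]) ts

theorem ded_congr (l : List (Int × Int)) : ∀ (s s' : List (Int × Int)),
    (∀ y ∈ l, (y ∈ s ↔ y ∈ s')) → ded s l = ded s' l := by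
  induction l with
  | nil => intro s s' _; rfl
  | cons tk ts ih =>
    intro s s' h
    simp only [ded]
    by_cases hm : tk ∈ s
    · rw [if_pos hm, if_pos ((h tk (by simp)).1 hm)]
      exact ih s s' (fun y hy => h y (by simp [hy]))
    · rw [if_neg hm, if_neg (fun hm' => hm ((h tk (by simp)).2 hm'))]
      refine congrArg _ (ih _ _ (fun y hy => ?_))
      simp only [List.mem_append, List.mem_singleton]
      exact or_congr_left (h y (by simp [hy]))

theorem foldl_add_eq_ded (l : List (Int × Int)) : ∀ (s : List (Int × Int)),
    l.foldl PySem.Set.add s = s ++ ded s l := by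
  induction l with
  | nil => intro s; simp [ded]
  | cons tk ts ih =>
    intro s
    simp only [List.foldl_cons, ded]
    by_cases hm : tk ∈ s
    · rw [if_pos hm, PySem.Set.add_of_mem hm, ih]
    · rw [if_neg hm, PySem.Set.add_of_not_mem hm, ih]
      simp

theorem dedup_eq_ded (l : List (Int × Int)) : PySem.List.dedup l = ded [] l := by
  have h := foldl_add_eq_ded l []
  simpa [PySem.List.dedup_eq_ofList, PySem.Set.ofList_eq_foldl] using h

def sameL (ts : List (Int × Int)) : List Int :=
  (ts.filter (fun tk => decide (tk.1 = tk.2))).map (fun tk => tk.1)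

theorem count_cons_ne (x h : Int) (t : List Int) (hxh : x ≠ h) :
    (h :: t).count x = t.count x := by
  simp [Ne.symm hxh]

-- A's station multiset = B's station multiset
theorem stationsA_perm (ts : List (Int × Int)) : ∀ (seen : List (Int × Int)),
    (stationsA seen ts).Perm
      (sameL ts ++ (ded seen (ts.filter (fun tk => decide (tk.1 ≠ tk.2)))).flatMap (fun tk => [tk.1, tk.2])) := by
  induction ts with
  | nil => intro seen; simp [stationsA, sameL, ded]
  | cons tk ts ih =>
    intro seen
    by_cases h1 : tk.1 = tk.2
    · -- same-endpoint ticket: contributes tk.1 once, never affects the dedup of distinct tickets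
      have hded : ded (PySem.Set.add seen tk) (ts.filter (fun tk => decide (tk.1 ≠ tk.2)))
          = ded seen (ts.filter (fun tk => decide (tk.1 ≠ tk.2))) := by
        refine ded_congr _ _ _ (fun y hy => ?_)
        have hy' : y.1 ≠ y.2 := by
          have := List.of_mem_filter hy
          simpa using this
        have hne : y ≠ tk := by
          intro h; rw [h] at hy'; exact hy' h1
        rw [PySem.Set.mem_add]
        simp [hne]
      have ihh := ih (PySem.Set.add seen tk)
      rw [hded] at ihh
      simp only [stationsA, contribA, if_pos h1, sameL] at ihh ⊢
      rw [List.filter_cons_of_pos (by simp [h1]), List.filter_cons_of_neg (by simp [h1])]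
      simp only [List.map_cons, List.cons_append]
      exact List.Perm.cons tk.1 ihh
    · by_cases h2 : tk ∈ seen
      · have hc : PySem.Set.contains seen tk = true := (PySem.Set.contains_iff seen tk).2 h2
        simp only [stationsA, contribA, if_neg h1, hc, if_true, List.nil_append, sameL]
        rw [List.filter_cons_of_neg (by simp [h1]), List.filter_cons_of_pos (by simp [h1])]
        simp only [ded, if_pos h2]
        rw [PySem.Set.add_of_mem h2]
        have ihh := ih seen
        simpa [sameL] using ihh
      · have hc : PySem.Set.contains seen tk = false :=
          Bool.eq_false_iff.2 (fun h => h2 ((PySem.Set.contains_iff seen tk).1 h))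
        simp only [stationsA, contribA, if_neg h1, hc, Bool.false_eq_true, if_false, sameL]
        rw [List.filter_cons_of_neg (by simp [h1]), List.filter_cons_of_pos (by simp [h1])]
        simp only [ded, if_neg h2, List.flatMap_cons]
        rw [PySem.Set.add_of_not_mem h2]
        have ihh := ih (seen ++ [tk])
        simp only [sameL] at ihh
        refine (List.Perm.cons tk.1 (List.Perm.cons tk.2 ihh)).trans ?_
        exact (List.perm_middle.trans (List.Perm.cons tk.1 List.perm_middle)).symm

-- the run-length scan over a sorted tail computes the maximal multiplicity
theorem runScan_spec (l : List Int) : ∀ (best run p : Int),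
    l.Pairwise (· ≤ ·) → (∀ x ∈ l, p ≤ x) → run ≤ best →
    best ≤ runScan l best run (some p)
    ∧ run + (l.count p : Int) ≤ runScan l best run (some p)
    ∧ (∀ x ∈ l, x ≠ p → (l.count x : Int) ≤ runScan l best run (some p))
    ∧ (runScan l best run (some p) = best
       ∨ runScan l best run (some p) ≤ run + (l.count p : Int)
       ∨ ∃ x ∈ l, x ≠ p ∧ runScan l best run (some p) ≤ (l.count x : Int)) := by
  induction l with
  | nil =>
    intro best run p _ _ hrb
    have hr : runScan [] best run (some p) = best := rfl
    rw [hr]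
    exact ⟨le_refl _, by simpa using hrb, by simp, Or.inl rfl⟩
  | cons h t ih =>
    intro best run p hpair hge hrb
    have hsorted_t : t.Pairwise (· ≤ ·) := hpair.of_cons
    have hhead : ∀ x ∈ t, h ≤ x := fun x hx => (List.pairwise_cons.1 hpair).1 x hx
    by_cases hp : h = p
    · -- extend the run
      have hstep : runScan (h :: t) best run (some p) = runScan t (max best (run + 1)) (run + 1) (some h) := by
        have hsome : some h = some p := by rw [hp]
        simp only [runScan, if_pos hsome]
        by_cases hc : run + 1 ≤ best
        · rw [if_neg (by omega), max_eq_left hc]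
        · rw [if_pos (by omega), max_eq_right (by omega)]
      obtain ⟨a, b, c, d⟩ := ih (max best (run + 1)) (run + 1) h hsorted_t hhead (le_max_right _ _)
      rw [hstep]
      subst hp
      have hcnt : ((h :: t).count h : Int) = (t.count h : Int) + 1 := by
        rw [List.count_cons_self]; push_cast; ring
      refine ⟨le_trans (le_max_left _ _) a, by omega, ?_, ?_⟩
      · intro x hx hxh
        rcases List.mem_cons.1 hx with rfl | hxt
        · exact absurd rfl hxh
        · have := c x hxt hxh
          rwa [count_cons_ne x h t hxh]
      · rcases d with d | d | ⟨x, hx, hxh, hle⟩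
        · by_cases hcase : run + 1 ≤ best
          · rw [max_eq_left hcase] at d ⊢; exact Or.inl d
          · rw [max_eq_right (by omega : best ≤ run + 1)] at d ⊢
            refine Or.inr (Or.inl ?_); omega
        · refine Or.inr (Or.inl ?_); omega
        · exact Or.inr (Or.inr ⟨x, List.mem_cons_of_mem _ hx, hxh, by rwa [count_cons_ne x h t hxh]⟩)
    · -- new station starts a run of length 1
      have hstep : runScan (h :: t) best run (some p) = runScan t (max best 1) 1 (some h) := by
        have hne : ¬ (some h = some p) := by simpa using hp
        simp only [runScan, if_neg hne]
        by_cases hc : (1 : Int) ≤ best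
        · rw [if_neg (by omega), max_eq_left hc]
        · rw [if_pos (by omega), max_eq_right (by omega)]
      obtain ⟨a, b, c, d⟩ := ih (max best 1) 1 h hsorted_t hhead (le_max_right _ _)
      rw [hstep]
      have hpnot : p ∉ h :: t := by
        intro hmem
        rcases List.mem_cons.1 hmem with rfl | hmemt
        · exact hp rfl
        · exact hp (le_antisymm (hhead p hmemt) (hge h (by simp)))
      have hcntp : ((h :: t).count p : Int) = 0 := by
        rw [List.count_eq_zero.2 hpnot]; rfl
      have hcnth : ((h :: t).count h : Int) = (t.count h : Int) + 1 := by
        rw [List.count_cons_self]; push_cast; ring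
      refine ⟨le_trans (le_max_left _ _) a, ?_, ?_, ?_⟩
      · rw [hcntp]; omega
      · intro x hx hxp
        rcases List.mem_cons.1 hx with rfl | hxt
        · rw [hcnth]; omega
        · by_cases hxh : x = h
          · subst hxh; rw [hcnth]; omega
          · have := c x hxt hxh
            rwa [count_cons_ne x h t hxh]
        -- note x ≠ h needed above
      · rcases d with d | d | ⟨x, hx, hxh, hle⟩
        · by_cases hcase : (1 : Int) ≤ best
          · rw [max_eq_left hcase] at d ⊢; exact Or.inl d
          · rw [max_eq_right (by omega : best ≤ 1)] at d ⊢
            refine Or.inr (Or.inr ⟨h, by simp, fun e => hp e, ?_⟩)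
            rw [hcnth]; omega
        · refine Or.inr (Or.inr ⟨h, by simp, fun e => hp e, ?_⟩)
          rw [hcnth]; omega
        · refine Or.inr (Or.inr ⟨x, List.mem_cons_of_mem _ hx, ?_, by rwa [count_cons_ne x h t hxh]⟩)
          intro e; subst e
          exact hpnot (List.mem_cons_of_mem _ hx)

-- on a nonempty sorted list the scan from the initial state is the maximal multiplicity
theorem runScan_sorted (h : Int) (t : List Int) (hpair : (h :: t).Pairwise (· ≤ ·)) :
    (∀ x ∈ h :: t, ((h :: t).count x : Int) ≤ runScan (h :: t) 0 0 none)
    ∧ (∃ x ∈ h :: t, runScan (h :: t) 0 0 none ≤ ((h :: t).count x : Int)) := by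
  have hstep : runScan (h :: t) 0 0 none = runScan t 1 1 (some h) := by
    simp [runScan]
  obtain ⟨a, b, c, d⟩ := runScan_spec t 1 1 h hpair.of_cons
    (fun x hx => (List.pairwise_cons.1 hpair).1 x hx) (le_refl 1)
  rw [hstep]
  have hcnth : ((h :: t).count h : Int) = (t.count h : Int) + 1 := by
    rw [List.count_cons_self]; push_cast; ring
  constructor
  · intro x hx
    rcases List.mem_cons.1 hx with rfl | hxt
    · rw [hcnth]; omega
    · by_cases hxh : x = h
      · subst hxh; rw [hcnth]; omega
      · have := c x hxt hxh
        rwa [count_cons_ne x h t hxh]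
  · rcases d with d | d | ⟨x, hx, hxh, hle⟩
    · exact ⟨h, by simp, by rw [hcnth]; omega⟩
    · exact ⟨h, by simp, by rw [hcnth]; omega⟩
    · exact ⟨x, List.mem_cons_of_mem _ hx, by rw [count_cons_ne x h t hxh]; exact hle⟩

-- ===== VERDICT (by name: the statement is the Claim_ definition above) =====
theorem solve_spec : Claim_equal_solve := by
  intro t _ hpre
  obtain ⟨f, s, tickets⟩ := t
  unfold Spec_solve solve solve_alt
  simp only []
  -- A's dict is Counter(SA)
  rw [foldA_snd]
  set SA := stationsA PySem.Set.empty tickets with hSA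
  have hcounter : (SA.foldl (fun d x => d.modify x 0 (· + 1)) PySem.Dict.empty) = PySem.Dict.counter SA := by
    rw [PySem.Dict.counter_eq_foldl]
  rw [hcounter]
  -- B's station list
  set SB := sameL tickets ++ (PySem.List.dedup (tickets.filter (fun tk => decide (tk.1 ≠ tk.2)))).flatMap (fun tk => [tk.1, tk.2]) with hSB
  have hperm : SA.Perm SB := by
    rw [hSB, dedup_eq_ded]
    exact stationsA_perm tickets []
  set SS := PySem.List.sorted SB (fun x => x) false with hSS
  have hpermSS : SS.Perm SA := (PySem.List.sorted_perm SB (fun x => x) false).trans hperm.symm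
  -- SA is nonempty
  have hSAne : SA ≠ [] := by
    rw [hSA]
    obtain ⟨tk, ts, rfl⟩ := List.exists_cons_of_ne_nil (by simpa [Pre_solve] using hpre)
    simp only [stationsA, contribA]
    by_cases h1 : tk.1 = tk.2
    · simp [h1]
    · simp [h1]
  -- the Counter's values
  have hvals : (PySem.Dict.counter SA).values = (PySem.Set.ofList SA).map (fun k => ((SA.count k : Nat) : Int)) := by
    have : (PySem.Dict.counter SA).values = (PySem.Dict.counter SA).items.map (fun p => p.2) := rfl
    rw [this, PySem.Dict.items_counter, List.map_map]
    rfl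
  have hvne : (PySem.Dict.counter SA).values ≠ [] := by
    rw [hvals]
    obtain ⟨y, ys, hy⟩ := List.exists_cons_of_ne_nil hSAne
    have : y ∈ PySem.Set.ofList SA := (PySem.Set.mem_ofList _ _).2 (by rw [hy]; simp)
    intro hnil
    rw [List.map_eq_nil_iff] at hnil
    simp [hnil] at this
  obtain ⟨m, hm⟩ : ∃ m, PySem.List.max? (PySem.Dict.counter SA).values (fun v => v) = some m := by
    rcases hopt : PySem.List.max? (PySem.Dict.counter SA).values (fun v => v) with _ | m
    · exact absurd ((PySem.List.max?_eq_none_iff _ _).1 hopt) hvne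
    · exact ⟨m, rfl⟩
  rw [hm]
  -- m is the max multiplicity of SA
  have hub : ∀ x ∈ SA, (SA.count x : Int) ≤ m := by
    intro x hx
    have hmem : ((SA.count x : Nat) : Int) ∈ (PySem.Dict.counter SA).values := by
      rw [hvals]
      exact List.mem_map.2 ⟨x, (PySem.Set.mem_ofList _ _).2 hx, rfl⟩
    exact PySem.List.max?_isMax hm _ hmem
  have hattain : ∃ k ∈ SA, m = (SA.count k : Int) := by
    have hmmem := PySem.List.max?_mem hm
    rw [hvals] at hmmem
    obtain ⟨k, hk, hke⟩ := List.mem_map.1 hmmem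
    exact ⟨k, (PySem.Set.mem_ofList _ _).1 hk, hke.symm⟩
  -- the scan result over SS
  obtain ⟨hh, ht, hSScons⟩ : ∃ hh ht, SS = hh :: ht := by
    rcases hSSe : SS with _ | ⟨hh, ht⟩
    · rw [hSSe] at hpermSS
      exact absurd hpermSS.nil_eq.symm hSAne
    · exact ⟨hh, ht, rfl⟩
  have hpairSS : SS.Pairwise (· ≤ ·) := by
    have := PySem.List.sorted_pairwise SB (fun x => x)
    simpa [← hSS] using this
  obtain ⟨hub', hatt'⟩ := runScan_sorted hh ht (by rwa [hSScons] at hpairSS)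
  rw [← hSScons] at hub' hatt'
  -- m = runScan SS 0 0 none
  have heq : m = runScan SS 0 0 none := by
    obtain ⟨k, hk, hke⟩ := hattain
    obtain ⟨x, hx, hxle⟩ := hatt'
    have h1 : m ≤ runScan SS 0 0 none := by
      rw [hke, ← hpermSS.count_eq k]
      exact hub' k (hpermSS.mem_iff.2 hk)
    have h2 : runScan SS 0 0 none ≤ m := by
      refine le_trans hxle ?_
      rw [hpermSS.count_eq x]
      exact hub x (hpermSS.mem_iff.1 hx)
    omega
  rw [heq]
  rfl
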